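-- pv_equiv track=rewrite | github.com/forest113/AlphaComplexAnalysisTools | ac_cpu_gpu_cmp.py | set_diff
-- ===== SOURCE A (Python) =====
-- def set_diff(A, B, k):
--     diff = []
--     for i in range(len(A)):
--         found = False
--         range_low = 0
--         range_high = len(B)
--         if(i-k > 0):
--             range_low = i-k
--         if(i+k < len(B)):
--             range_high = i+k
--
--         for j in range(range_low, range_high):
--                 if(A[i] == B[j]):
--                     found = True
--         if(found == False):
--             diff.append(A[i])
--     return diff
-- ===== SOURCE B (Python) =====
-- def set_diff(A, B, k):
--     # Index B's positions by value once, then answer each window query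
--     # by scanning only that value's (short) position list.
--     pos = {}
--     for j, x in enumerate(B):
--         pos.setdefault(x, []).append(j)
--     nB = len(B)
--     diff = []
--     for i, x in enumerate(A):
--         low = max(i - k, 0)
--         high = min(i + k, nB)
--         if not any(low <= p < high for p in pos.get(x, [])):
--             diff.append(x)
--     return diff
-- ===== Notes on version B (the rewrite author's own statement) =====
-- stated objective: faster
-- what changed: B builds a value-to-sorted-position-indices dict of B once and answers each element's window query by scanning only that value's occurrence list, instead of A's inner scan over the whole index window of B.
import Mathlib
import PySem

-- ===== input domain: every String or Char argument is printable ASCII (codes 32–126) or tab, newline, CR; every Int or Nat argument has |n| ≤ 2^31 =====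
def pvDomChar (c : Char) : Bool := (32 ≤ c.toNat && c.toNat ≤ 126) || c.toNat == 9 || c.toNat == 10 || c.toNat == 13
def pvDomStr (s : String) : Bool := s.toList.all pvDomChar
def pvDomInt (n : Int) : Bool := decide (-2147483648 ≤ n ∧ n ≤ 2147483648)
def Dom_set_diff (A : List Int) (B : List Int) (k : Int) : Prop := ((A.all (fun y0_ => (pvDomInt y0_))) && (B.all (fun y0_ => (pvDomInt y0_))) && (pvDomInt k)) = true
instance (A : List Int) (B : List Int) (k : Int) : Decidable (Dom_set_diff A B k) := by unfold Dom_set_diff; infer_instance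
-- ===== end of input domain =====

-- B replaces A's per-element scan of the index window in B with a one-time
-- value→positions index of B queried per element (objective: faster).

-- ===== PORT A =====
def set_diff (A : List Int) (B : List Int) (k : Int) : List Int :=
  (PySem.List.pyRange 0 (A.length : Int) 1).foldl (fun diff i =>
    let range_low : Int := if i - k > 0 then i - k else 0
    let range_high : Int := if i + k < (B.length : Int) then i + k else (B.length : Int)
    let found : Bool := (PySem.List.pyRange range_low range_high 1).foldl
      (fun found j =>
        if PySem.List.pyGetD A i 0 == PySem.List.pyGetD B j 0 then true else found) false
    if found = false then diff ++ [PySem.List.pyGetD A i 0] else diff) []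

-- ===== PORT B =====
def set_diff_alt (A : List Int) (B : List Int) (k : Int) : List Int :=
  let pos : PySem.Dict Int (List Int) :=
    (PySem.List.enumerate B 0).foldl
      (fun d jx => d.modify jx.2 [] (fun l => l ++ [jx.1])) PySem.Dict.empty
  let nB : Int := (B.length : Int)
  (PySem.List.enumerate A 0).foldl (fun diff ix =>
    let low : Int := max (ix.1 - k) 0
    let high : Int := min (ix.1 + k) nB
    if !((pos.getD ix.2 []).any (fun p => decide (low ≤ p) && decide (p < high)))
    then diff ++ [ix.2] else diff) []

-- ===== PRECONDITION & SPEC =====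
def Spec_set_diff (A : List Int) (B : List Int) (k : Int) (out : List Int) : Prop := out = set_diff_alt A B k
instance (A : List Int) (B : List Int) (k : Int) (out : List Int) : Decidable (Spec_set_diff A B k out) := by unfold Spec_set_diff; infer_instance

-- ===== CLAIM (what is proved, stated in full; the proofs are below) =====
def Claim_equal_set_diff : Prop := ∀ (A : List Int) (B : List Int) (k : Int), Dom_set_diff A B k → Spec_set_diff A B k (set_diff A B k)

-- ===== LEMMAS AND PROOFS =====

-- positions stored for value v are exactly the indices of B holding v
lemma mem_pos_iff (B : List Int) (v p : Int) :
    p ∈ (((PySem.List.enumerate B 0).foldl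
      (fun d jx => d.modify jx.2 [] (fun l => l ++ [jx.1]))
      (PySem.Dict.empty : PySem.Dict Int (List Int))).getD v [])
    ↔ 0 ≤ p ∧ p < (B.length : Int) ∧ PySem.List.pyGetD B p 0 = v := by
  have h : (PySem.List.enumerate B 0).foldl
      (fun d jx => d.modify jx.2 [] (fun l => l ++ [jx.1]))
      (PySem.Dict.empty : PySem.Dict Int (List Int))
    = ((PySem.List.enumerate B 0).map Prod.swap).foldl
      (fun d q => d.modify q.1 [] (fun l => l ++ [q.2])) PySem.Dict.empty := by
    rw [List.foldl_map]
    simp only [Prod.fst_swap, Prod.snd_swap]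
  rw [h, PySem.Dict.getD_foldl_modify_append]
  simp only [PySem.Dict.getD_empty, List.nil_append]
  constructor
  · intro hp
    obtain ⟨q, hq, rfl⟩ := List.mem_map.mp hp
    obtain ⟨hq1, hv⟩ := List.mem_filter.mp hq
    obtain ⟨r, hr, rfl⟩ := List.mem_map.mp hq1
    obtain ⟨j, hj, rfl⟩ := (PySem.List.mem_enumerate_iff B 0 r).mp hr
    simp only [Prod.swap_prod_mk, beq_iff_eq, zero_add] at hv ⊢
    refine ⟨by positivity, by exact_mod_cast hj, ?_⟩
    rw [PySem.List.pyGetD_eq_getElem B 0 (by positivity) (by exact_mod_cast hj)]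
    simpa using hv
  · rintro ⟨h0, h1, h2⟩
    have hlt : p.toNat < B.length := by omega
    have hBv : B[p.toNat] = v := by
      rw [← h2, PySem.List.pyGetD_eq_getElem B 0 h0 h1]
    refine List.mem_map.mpr ⟨(v, p), List.mem_filter.mpr ⟨?_, by simp⟩, rfl⟩
    refine List.mem_map.mpr ⟨(0 + (p.toNat : Int), B[p.toNat]), ?_, ?_⟩
    · exact (PySem.List.mem_enumerate_iff B 0 _).mpr ⟨p.toNat, hlt, rfl⟩
    · simp only [Prod.swap_prod_mk, hBv]
      have : (0 : Int) + (p.toNat : Int) = p := by omega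
      rw [this]

-- the window scan of A equals the position-list query of B
lemma window_eq (B : List Int) (v low high : Int) (h0 : 0 ≤ low) (h1 : high ≤ (B.length : Int)) :
    (PySem.List.pyRange low high 1).any (fun j => v == PySem.List.pyGetD B j 0)
    = (((PySem.List.enumerate B 0).foldl
        (fun d jx => d.modify jx.2 [] (fun l => l ++ [jx.1]))
        (PySem.Dict.empty : PySem.Dict Int (List Int))).getD v []).any
        (fun p => decide (low ≤ p) && decide (p < high)) := by
  rw [Bool.eq_iff_iff, List.any_eq_true, List.any_eq_true]
  constructor
  · rintro ⟨j, hj, hv⟩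
    obtain ⟨hj1, hj2⟩ := PySem.List.mem_pyRange_one.mp hj
    refine ⟨j, (mem_pos_iff B v j).mpr ⟨by omega, by omega, ((beq_iff_eq).mp hv).symm⟩, ?_⟩
    simp [hj1, hj2]
  · rintro ⟨p, hp, hw⟩
    obtain ⟨_, _, hv⟩ := (mem_pos_iff B v p).mp hp
    simp only [Bool.and_eq_true, decide_eq_true_eq] at hw
    exact ⟨p, PySem.List.mem_pyRange_one.mpr ⟨hw.1, hw.2⟩, by simp [hv]⟩

-- ===== VERDICT (by name: the statement is the Claim_ definition above) =====
theorem set_diff_spec : Claim_equal_set_diff := by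
  intro A B k _
  unfold Spec_set_diff
  simp only [set_diff, set_diff_alt]
  rw [PySem.List.enumerate_eq_map_pyRange A 0, List.foldl_map, PySem.List.len_eq]
  refine PySem.List.foldl_congr_mem _ _ _ _ ?_
  intro acc i hi
  obtain ⟨hi0, _⟩ := PySem.List.mem_pyRange_one.mp hi
  simp only
  rw [PySem.List.foldl_if_true_eq]
  have hlow : (if i - k > 0 then i - k else 0) = max (i - k) 0 := by
    split_ifs <;> omega
  have hhigh : (if i + k < (B.length : Int) then i + k else (B.length : Int))
      = min (i + k) (B.length : Int) := by
    split_ifs <;> omega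
  rw [hlow, hhigh,
    window_eq B (PySem.List.pyGetD A i 0) (max (i - k) 0) (min (i + k) (B.length : Int))
      (by omega) (by omega)]
  simp only [Bool.false_or, Bool.not_eq_eq_eq_not, Bool.not_true]
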